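-- pv_equiv track=rewrite | github.com/camayank/jorss-gbo-taai | src/admin_panel/services/audit_service.py | _check_compliance_flags
-- ===== SOURCE A (Python) =====
-- from typing import Optional, List, Dict, Any
-- from enum import Enum
--
-- class AuditAction(str, Enum):
--     """Types of auditable actions."""
--     # Authentication
--     LOGIN = "login"
--     LOGOUT = "logout"
--     LOGIN_FAILED = "login_failed"
--     PASSWORD_CHANGED = "password_changed"
--     MFA_ENABLED = "mfa_enabled"
--     MFA_DISABLED = "mfa_disabled"
--
--     # User Management
--     USER_CREATED = "user_created"
--     USER_UPDATED = "user_updated"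
--     USER_DEACTIVATED = "user_deactivated"
--     USER_REACTIVATED = "user_reactivated"
--     ROLE_CHANGED = "role_changed"
--     INVITATION_SENT = "invitation_sent"
--     INVITATION_ACCEPTED = "invitation_accepted"
--
--     # Client Management
--     CLIENT_CREATED = "client_created"
--     CLIENT_UPDATED = "client_updated"
--     CLIENT_DELETED = "client_deleted"
--     CLIENT_ACCESSED = "client_accessed"
--
--     # Document Management
--     DOCUMENT_UPLOADED = "document_uploaded"
--     DOCUMENT_DOWNLOADED = "document_downloaded"
--     DOCUMENT_DELETED = "document_deleted"
--
--     # Tax Operations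
--     RETURN_CREATED = "return_created"
--     RETURN_UPDATED = "return_updated"
--     RETURN_SUBMITTED = "return_submitted"
--     RETURN_APPROVED = "return_approved"
--
--     # Billing
--     SUBSCRIPTION_CHANGED = "subscription_changed"
--     PAYMENT_PROCESSED = "payment_processed"
--
--     # Settings
--     SETTINGS_UPDATED = "settings_updated"
--     API_KEY_CREATED = "api_key_created"
--     API_KEY_REVOKED = "api_key_revoked"
--
--     # Admin
--     IMPERSONATION_STARTED = "impersonation_started"
--     IMPERSONATION_ENDED = "impersonation_ended"
--     DATA_EXPORTED = "data_exported"
--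
-- def _check_compliance_flags(logs: List[Dict]) -> List[Dict]:
--     """Check for compliance issues in logs."""
--     flags = []
--
--     # Check for multiple failed logins
--     failed_logins = [log for log in logs if log["action"] == AuditAction.LOGIN_FAILED.value]
--     if len(failed_logins) > 10:
--         flags.append({
--             "type": "security",
--             "severity": "warning",
--             "message": f"High number of failed login attempts: {len(failed_logins)}",
--         })
--
--     # Check for MFA disabled
--     mfa_disabled = [log for log in logs if log["action"] == AuditAction.MFA_DISABLED.value]
--     if mfa_disabled:
--         flags.append({
--             "type": "security",
--             "severity": "info",
--             "message": f"MFA was disabled {len(mfa_disabled)} time(s)",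
--         })
--
--     # Check for impersonation
--     impersonations = [log for log in logs if log.get("impersonator_id")]
--     if impersonations:
--         flags.append({
--             "type": "audit",
--             "severity": "info",
--             "message": f"Platform admin impersonation occurred {len(impersonations)} time(s)",
--         })
--
--     return flags
-- ===== SOURCE B (Python) =====
-- def _check_compliance_flags(logs):
--     """Check for compliance issues in logs (single pass with three counters)."""
--     failed = 0
--     mfa = 0
--     imp = 0
--     for log in logs:
--         action = log["action"]
--         if action == "login_failed":
--             failed += 1
--         if action == "mfa_disabled":
--             mfa += 1
--         if log.get("impersonator_id"):
--             imp += 1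
--     flags = []
--     if failed > 10:
--         flags.append({
--             "type": "security",
--             "severity": "warning",
--             "message": f"High number of failed login attempts: {failed}",
--         })
--     if mfa:
--         flags.append({
--             "type": "security",
--             "severity": "info",
--             "message": f"MFA was disabled {mfa} time(s)",
--         })
--     if imp:
--         flags.append({
--             "type": "audit",
--             "severity": "info",
--             "message": f"Platform admin impersonation occurred {imp} time(s)",
--         })
--     return flags
-- ===== Notes on version B (the rewrite author's own statement) =====
-- stated objective: simpler
-- what changed: Replaces A's three separate list-comprehension passes (building three intermediate lists) with one fused loop that maintains three integer counters and then emits the flags from the counters.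
import Mathlib
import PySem

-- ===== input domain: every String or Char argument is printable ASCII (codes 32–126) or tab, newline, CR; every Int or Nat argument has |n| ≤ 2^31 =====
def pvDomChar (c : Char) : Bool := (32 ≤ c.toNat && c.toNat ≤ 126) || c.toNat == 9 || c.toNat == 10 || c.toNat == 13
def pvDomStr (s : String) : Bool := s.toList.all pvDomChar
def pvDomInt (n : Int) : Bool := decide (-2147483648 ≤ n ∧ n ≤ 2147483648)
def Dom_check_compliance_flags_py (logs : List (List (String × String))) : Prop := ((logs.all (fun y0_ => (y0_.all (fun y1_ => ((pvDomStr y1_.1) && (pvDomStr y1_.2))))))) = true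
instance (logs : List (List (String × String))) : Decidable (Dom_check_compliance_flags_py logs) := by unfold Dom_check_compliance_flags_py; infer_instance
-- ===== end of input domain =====

-- B fuses A's three filtering passes into a single counting loop; objective: simpler (one pass, no intermediate lists).


-- dict lookup (first match) on the association-list encoding of a Python dict
def pvLookup (log : List (String × String)) (k : String) : Option String :=
  (log.find? (fun p => p.1 == k)).map Prod.snd

-- log[k]: total form, exact under Pre_ (key present); outside Pre_ Python raises KeyError
def pvGetKey (log : List (String × String)) (k : String) : String :=
  (pvLookup log k).getD ""

-- bool(log.get("impersonator_id")): present and a non-empty string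
def pvImpTruthy (log : List (String × String)) : Bool :=
  (pvLookup log "impersonator_id").getD "" != ""

-- ===== PORT A =====
def check_compliance_flags_py (logs : List (List (String × String))) : List (List (String × String)) :=
  let failed_logins := logs.filter (fun log => pvGetKey log "action" == "login_failed")
  let flags1 : List (List (String × String)) :=
    if failed_logins.length > 10 then
      [[("type", "security"), ("severity", "warning"),
        ("message", "High number of failed login attempts: " ++ PySem.Int.toStr (failed_logins.length : Int))]]
    else []
  let mfa_disabled := logs.filter (fun log => pvGetKey log "action" == "mfa_disabled")
  let flags2 : List (List (String × String)) :=
    if mfa_disabled.length ≠ 0 then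
      flags1 ++ [[("type", "security"), ("severity", "info"),
        ("message", "MFA was disabled " ++ PySem.Int.toStr (mfa_disabled.length : Int) ++ " time(s)")]]
    else flags1
  let impersonations := logs.filter (fun log => pvImpTruthy log)
  if impersonations.length ≠ 0 then
    flags2 ++ [[("type", "audit"), ("severity", "info"),
      ("message", "Platform admin impersonation occurred " ++ PySem.Int.toStr (impersonations.length : Int) ++ " time(s)")]]
  else flags2

-- ===== PORT B =====
def check_compliance_flags_py_alt (logs : List (List (String × String))) : List (List (String × String)) :=
  let c : Int × Int × Int := logs.foldl (fun acc log =>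
      let action := pvGetKey log "action"
      ((if action == "login_failed" then acc.1 + 1 else acc.1),
       (if action == "mfa_disabled" then acc.2.1 + 1 else acc.2.1),
       (if pvImpTruthy log then acc.2.2 + 1 else acc.2.2))) (0, 0, 0)
  (if c.1 > 10 then
      [[("type", "security"), ("severity", "warning"),
        ("message", "High number of failed login attempts: " ++ PySem.Int.toStr c.1)]]
    else []) ++
  (if c.2.1 ≠ 0 then
      [[("type", "security"), ("severity", "info"),
        ("message", "MFA was disabled " ++ PySem.Int.toStr c.2.1 ++ " time(s)")]]
    else []) ++
  (if c.2.2 ≠ 0 then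
      [[("type", "audit"), ("severity", "info"),
        ("message", "Platform admin impersonation occurred " ++ PySem.Int.toStr c.2.2 ++ " time(s)")]]
    else [])

-- ===== PRECONDITION & SPEC =====
-- Pre_ excludes only inputs where Python A raises KeyError: a log dict without an "action" key.
def Pre_check_compliance_flags_py (logs : List (List (String × String))) : Prop :=
  (logs.all (fun log => (pvLookup log "action").isSome)) = true
instance (logs : List (List (String × String))) : Decidable (Pre_check_compliance_flags_py logs) := by
  unfold Pre_check_compliance_flags_py; infer_instance

def pvWitness_check_compliance_flags_py : (List (List (String × String))) :=
  [[("action", "mfa_disabled")], [("action", "login"), ("impersonator_id", "42")]]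

def Spec_check_compliance_flags_py (logs : List (List (String × String))) (out : List (List (String × String))) : Prop := out = check_compliance_flags_py_alt logs
instance (logs : List (List (String × String))) (out : List (List (String × String))) : Decidable (Spec_check_compliance_flags_py logs out) := by unfold Spec_check_compliance_flags_py; infer_instance

-- ===== CLAIM (what is proved, stated in full; the proofs are below) =====
def Claim_equal_check_compliance_flags_py : Prop := ∀ (logs : List (List (String × String))), Dom_check_compliance_flags_py logs → Pre_check_compliance_flags_py logs → Spec_check_compliance_flags_py logs (check_compliance_flags_py logs)

-- ===== LEMMAS AND PROOFS =====

-- the fused counting loop computes the three filter lengths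
lemma fold_counts (logs : List (List (String × String))) (a b c : Int) :
    logs.foldl (fun acc log =>
      let action := pvGetKey log "action"
      ((if action == "login_failed" then acc.1 + 1 else acc.1),
       (if action == "mfa_disabled" then acc.2.1 + 1 else acc.2.1),
       (if pvImpTruthy log then acc.2.2 + 1 else acc.2.2))) ((a, b, c) : Int × Int × Int)
    = (a + ((logs.filter (fun log => pvGetKey log "action" == "login_failed")).length : Int),
       b + ((logs.filter (fun log => pvGetKey log "action" == "mfa_disabled")).length : Int),
       c + ((logs.filter (fun log => pvImpTruthy log)).length : Int)) := by
  induction logs generalizing a b c with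
  | nil => simp
  | cons hd tl ih =>
    simp only [List.foldl_cons, List.filter_cons]
    rw [ih]
    split_ifs <;> simp <;> ring_nf <;> simp

-- ===== VERDICT (by name: the statement is the Claim_ definition above) =====
theorem check_compliance_flags_py_spec : Claim_equal_check_compliance_flags_py := by
  intro logs _ _
  unfold Spec_check_compliance_flags_py check_compliance_flags_py check_compliance_flags_py_alt
  rw [fold_counts]
  simp only [zero_add]
  split_ifs with h1 h2 h3 <;> simp_all <;> omega
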